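-- pv_equiv track=rewrite | github.com/toki0411/Algorithm | 프로그래머스/2/172927. 광물 캐기/광물 캐기.py | calStemina
-- ===== SOURCE A (Python) =====
-- def calStemina(start, end, tool, minerals):
--     stemina = 0;
--     if tool == "dia":
--         for i in range(start, end):
--             stemina += 1
--     elif tool == "iron":
--          for i in range(start, end):
--             if minerals[i] == "diamond":
--                 stemina += 5
--             else:
--                 stemina += 1
--     else:
--         for i in range(start, end):
--             if minerals[i] == "diamond":
--                 stemina += 25
--             elif minerals[i] == "iron":
--                 stemina += 5
--             else:
--                 stemina += 1
--     return stemina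
-- ===== SOURCE B (Python) =====
-- def calStemina(start, end, tool, minerals):
--     if tool == "dia":
--         return len(range(start, end))
--     d = r = o = 0
--     for i in range(start, end):
--         m = minerals[i]
--         if m == "diamond":
--             d += 1
--         elif m == "iron":
--             r += 1
--         else:
--             o += 1
--     if tool == "iron":
--         return d * 5 + r + o
--     return d * 25 + r * 5 + o
-- ===== Notes on version B (the rewrite author's own statement) =====
-- stated objective: alternative
-- what changed: Replaces A's per-tool scan-and-add loops by a single counting pass (diamond/iron/other tallies) combined in a closed-form per-tool arithmetic expression; for 'dia' the loop becomes len(range(start,end)) with no loop at all.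
import Mathlib
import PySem

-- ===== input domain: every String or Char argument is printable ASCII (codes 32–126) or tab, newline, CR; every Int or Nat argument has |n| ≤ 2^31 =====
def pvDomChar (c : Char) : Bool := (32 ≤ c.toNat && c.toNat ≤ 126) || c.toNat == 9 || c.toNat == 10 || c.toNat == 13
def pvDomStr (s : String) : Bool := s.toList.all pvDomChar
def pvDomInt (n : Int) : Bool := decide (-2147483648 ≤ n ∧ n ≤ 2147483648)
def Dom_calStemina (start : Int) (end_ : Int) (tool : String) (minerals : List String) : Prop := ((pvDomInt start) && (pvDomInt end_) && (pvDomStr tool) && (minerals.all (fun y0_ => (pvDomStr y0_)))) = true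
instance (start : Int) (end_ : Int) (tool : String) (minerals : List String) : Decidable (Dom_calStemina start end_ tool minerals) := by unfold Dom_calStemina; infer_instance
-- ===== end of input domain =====

-- B replaces A's per-tool scan-and-add loops by one counting pass plus closed-form
-- per-tool arithmetic (and no loop at all for "dia"); return values proved equal on Pre_.

-- ===== PORT A =====
def calStemina (start : Int) (end_ : Int) (tool : String) (minerals : List String) : Int :=
  if tool == "dia" then
    (PySem.List.pyRange start end_ 1).foldl (fun s _ => s + 1) 0
  else if tool == "iron" then
    (PySem.List.pyRange start end_ 1).foldl (fun s i =>
      if PySem.List.pyGetD minerals i "" == "diamond" then s + 5 else s + 1) 0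
  else
    (PySem.List.pyRange start end_ 1).foldl (fun s i =>
      if PySem.List.pyGetD minerals i "" == "diamond" then s + 25
      else if PySem.List.pyGetD minerals i "" == "iron" then s + 5
      else s + 1) 0

-- ===== PORT B =====
def calStemina_alt (start : Int) (end_ : Int) (tool : String) (minerals : List String) : Int :=
  if tool == "dia" then
    ((PySem.List.pyRange start end_ 1).length : Int)
  else
    let t := (PySem.List.pyRange start end_ 1).foldl (fun (acc : Int × Int × Int) i =>
      if PySem.List.pyGetD minerals i "" == "diamond" then (acc.1 + 1, acc.2.1, acc.2.2)
      else if PySem.List.pyGetD minerals i "" == "iron" then (acc.1, acc.2.1 + 1, acc.2.2)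
      else (acc.1, acc.2.1, acc.2.2 + 1)) (0, 0, 0)
    if tool == "iron" then t.1 * 5 + t.2.1 + t.2.2
    else t.1 * 25 + t.2.1 * 5 + t.2.2

-- ===== PRECONDITION & SPEC =====
-- Pre_ excludes exactly the inputs where Python A raises IndexError: a tool other than
-- "dia" with a non-empty index range reaching outside [-len(minerals), len(minerals)).
def Pre_calStemina (start : Int) (end_ : Int) (tool : String) (minerals : List String) : Prop :=
  tool = "dia" ∨ end_ ≤ start ∨
    (-(minerals.length : Int) ≤ start ∧ end_ ≤ (minerals.length : Int))
instance (start : Int) (end_ : Int) (tool : String) (minerals : List String) : Decidable (Pre_calStemina start end_ tool minerals) := by unfold Pre_calStemina; infer_instance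
def pvWitness_calStemina : Int × Int × String × List String := (0, 3, "iron", ["diamond", "iron", "stone"])

def Spec_calStemina (start : Int) (end_ : Int) (tool : String) (minerals : List String) (out : Int) : Prop := out = calStemina_alt start end_ tool minerals
instance (start : Int) (end_ : Int) (tool : String) (minerals : List String) (out : Int) : Decidable (Spec_calStemina start end_ tool minerals out) := by unfold Spec_calStemina; infer_instance

-- ===== CLAIM =====
def Claim_equal_calStemina : Prop := ∀ (start : Int) (end_ : Int) (tool : String) (minerals : List String), Dom_calStemina start end_ tool minerals → Pre_calStemina start end_ tool minerals → Spec_calStemina start end_ tool minerals (calStemina start end_ tool minerals)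

-- ===== LEMMAS AND PROOFS =====

theorem foldB_eq (m : Int → String) (l : List Int) : ∀ (d r o : Int),
    l.foldl (fun (acc : Int × Int × Int) i =>
      if m i == "diamond" then (acc.1 + 1, acc.2.1, acc.2.2)
      else if m i == "iron" then (acc.1, acc.2.1 + 1, acc.2.2)
      else (acc.1, acc.2.1, acc.2.2 + 1)) (d, r, o)
    = (d + (l.countP (fun i => m i == "diamond") : Int),
       r + (l.countP (fun i => !(m i == "diamond") && m i == "iron") : Int),
       o + (l.countP (fun i => !(m i == "diamond") && !(m i == "iron")) : Int)) := by
  induction l with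
  | nil => simp
  | cons x xs ih =>
    intro d r o
    rw [List.foldl_cons]
    by_cases h1 : (m x == "diamond") = true
    · simp only [if_pos h1]
      rw [ih]
      simp [h1, Prod.ext_iff]
      omega
    · by_cases h2 : (m x == "iron") = true
      · simp only [if_neg h1, if_pos h2]
        rw [ih]
        simp [h1, h2, Prod.ext_iff]
        omega
      · simp only [if_neg h1, if_neg h2]
        rw [ih]
        simp [h1, h2, Prod.ext_iff]
        omega

theorem foldA_iron (m : Int → String) (l : List Int) : ∀ (s : Int),
    l.foldl (fun s i => if m i == "diamond" then s + 5 else s + 1) s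
    = s + (l.countP (fun i => m i == "diamond") : Int) * 5
        + ((l.length : Int) - (l.countP (fun i => m i == "diamond") : Int)) := by
  induction l with
  | nil => simp
  | cons x xs ih =>
    intro s
    rw [List.foldl_cons]
    by_cases h1 : (m x == "diamond") = true
    · simp only [if_pos h1]
      rw [ih]
      simp [h1]
      ring
    · simp only [if_neg h1]
      rw [ih]
      simp [h1]
      ring

theorem foldA_stone (m : Int → String) (l : List Int) : ∀ (s : Int),
    l.foldl (fun s i =>
      if m i == "diamond" then s + 25
      else if m i == "iron" then s + 5
      else s + 1) s
    = s + (l.countP (fun i => m i == "diamond") : Int) * 25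
        + (l.countP (fun i => !(m i == "diamond") && m i == "iron") : Int) * 5
        + (l.countP (fun i => !(m i == "diamond") && !(m i == "iron")) : Int) := by
  induction l with
  | nil => simp
  | cons x xs ih =>
    intro s
    rw [List.foldl_cons]
    by_cases h1 : (m x == "diamond") = true
    · simp only [if_pos h1]
      rw [ih]
      simp [h1]
      ring
    · by_cases h2 : (m x == "iron") = true
      · simp only [if_neg h1, if_pos h2]
        rw [ih]
        simp [h1, h2]
        ring
      · simp only [if_neg h1, if_neg h2]
        rw [ih]
        simp [h1, h2]
        ring

theorem foldl_count_ones (l : List Int) (s : Int) :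
    l.foldl (fun s _ => s + 1) s = s + (l.length : Int) := by
  induction l generalizing s with
  | nil => simp
  | cons x xs ih => rw [List.foldl_cons, ih]; simp; omega

theorem countP_split (m : Int → String) (l : List Int) :
    l.countP (fun i => m i == "diamond")
    + l.countP (fun i => !(m i == "diamond") && m i == "iron")
    + l.countP (fun i => !(m i == "diamond") && !(m i == "iron")) = l.length := by
  induction l with
  | nil => simp
  | cons x xs ih =>
    simp only [List.countP_cons, List.length_cons]
    by_cases h1 : (m x == "diamond") = true <;> by_cases h2 : (m x == "iron") = true <;>
      simp [h1, h2] <;> omega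

-- ===== VERDICT =====
theorem calStemina_spec : Claim_equal_calStemina := by
  intro start end_ tool minerals _ _
  unfold Spec_calStemina calStemina calStemina_alt
  by_cases hd : (tool == "dia") = true
  · rw [if_pos hd, if_pos hd, foldl_count_ones]
    ring
  · rw [if_neg hd, if_neg hd]
    have hsplit := countP_split (fun i => PySem.List.pyGetD minerals i "")
      (PySem.List.pyRange start end_ 1)
    rw [foldB_eq (fun i => PySem.List.pyGetD minerals i "")
      (PySem.List.pyRange start end_ 1) 0 0 0]
    by_cases hi : (tool == "iron") = true
    · rw [if_pos hi, if_pos hi, foldA_iron (fun i => PySem.List.pyGetD minerals i "")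
        (PySem.List.pyRange start end_ 1) 0]
      dsimp only
      omega
    · rw [if_neg hi, if_neg hi, foldA_stone (fun i => PySem.List.pyGetD minerals i "")
        (PySem.List.pyRange start end_ 1) 0]
      dsimp only
      omega
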